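-- pv_equiv track=rewrite | github.com/Sharat21/StopTheVirus | StopTheVirus/main.py | shooting_enemies
-- ===== SOURCE A (Python) =====
-- def shooting_enemies(list_bullets: list, list_enemies: list) -> bool:
--     for j in reversed(range(len(list_bullets))):
--         for i in reversed(range(len(list_enemies))):
--             if list_bullets[j] == list_enemies[i]:
--                 list_enemies.pop(i)
--                 list_bullets.pop(j)
--                 return True
--     return False
-- ===== SOURCE B (Python) =====
-- def shooting_enemies(list_bullets: list, list_enemies: list) -> bool:
--     # Sort-and-merge intersection test: walk two sorted copies with two pointers.
--     # NOTE: unlike A, B does not mutate its arguments; the return value is the same.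
--     bs = sorted(list_bullets)
--     es = sorted(list_enemies)
--     i = j = 0
--     while i < len(bs) and j < len(es):
--         if bs[i] == es[j]:
--             return True
--         elif bs[i] < es[j]:
--             i += 1
--         else:
--             j += 1
--     return False
-- ===== Notes on version B (the rewrite author's own statement) =====
-- stated objective: alternative
-- what changed: B decides whether the two lists share a value by sorting copies of both and running a two-pointer merge scan, instead of A's nested backward scans comparing every bullet with every enemy; B returns instead of mutating the argument lists (return value is identical).
import Mathlib
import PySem

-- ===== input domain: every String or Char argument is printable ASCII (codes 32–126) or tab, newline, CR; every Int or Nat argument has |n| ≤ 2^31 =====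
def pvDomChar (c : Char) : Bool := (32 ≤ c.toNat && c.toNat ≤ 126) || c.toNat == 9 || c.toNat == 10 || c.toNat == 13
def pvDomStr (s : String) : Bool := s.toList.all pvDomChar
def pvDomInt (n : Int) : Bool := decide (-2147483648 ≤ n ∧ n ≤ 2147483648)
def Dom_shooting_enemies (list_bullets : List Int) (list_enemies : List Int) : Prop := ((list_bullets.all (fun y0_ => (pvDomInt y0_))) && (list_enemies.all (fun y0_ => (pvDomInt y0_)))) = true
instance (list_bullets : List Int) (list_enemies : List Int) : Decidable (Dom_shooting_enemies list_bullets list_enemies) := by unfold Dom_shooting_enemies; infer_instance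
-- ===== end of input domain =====

-- B decides the shared-value question by a sort + two-pointer merge scan instead of A's
-- nested scans; equivalence is about the RETURN value only (A pops the matched pair from
-- both argument lists, B does not mutate them).
-- ===== PORT A =====
-- for j in reversed(range(len(bullets))): for i in reversed(range(len(enemies))): if b[j]==e[i]: return True
def shooting_enemies (list_bullets : List Int) (list_enemies : List Int) : Bool :=
  (PySem.List.pyRange ((list_bullets.length : Int) - 1) (-1) (-1)).any (fun j =>
    (PySem.List.pyRange ((list_enemies.length : Int) - 1) (-1) (-1)).any (fun i =>
      PySem.List.pyGetD list_bullets j 0 == PySem.List.pyGetD list_enemies i 0))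

-- ===== PORT B =====
-- the while-loop over the two sorted copies, as structural recursion on the two lists
def pvMerge : List Int → List Int → Bool
  | [], _ => false
  | _ :: _, [] => false
  | a :: as, b :: bs =>
      if a == b then true
      else if a < b then pvMerge as (b :: bs)
      else pvMerge (a :: as) bs

-- bs = sorted(bullets); es = sorted(enemies); two-pointer merge scan
def shooting_enemies_alt (list_bullets : List Int) (list_enemies : List Int) : Bool :=
  pvMerge (PySem.List.sorted list_bullets (fun x => x) false)
          (PySem.List.sorted list_enemies (fun x => x) false)

-- ===== PRECONDITION & SPEC =====
def Spec_shooting_enemies (list_bullets : List Int) (list_enemies : List Int) (out : Bool) : Prop := out = shooting_enemies_alt list_bullets list_enemies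
instance (list_bullets : List Int) (list_enemies : List Int) (out : Bool) : Decidable (Spec_shooting_enemies list_bullets list_enemies out) := by unfold Spec_shooting_enemies; infer_instance

-- ===== CLAIM (what is proved, stated in full; the proofs are below) =====
def Claim_equal_shooting_enemies : Prop := ∀ (list_bullets : List Int) (list_enemies : List Int), Dom_shooting_enemies list_bullets list_enemies → Spec_shooting_enemies list_bullets list_enemies (shooting_enemies list_bullets list_enemies)

-- ===== LEMMAS AND PROOFS =====

-- any over a backward index range = any over the list itself
lemma any_pyRange_rev (xs : List Int) (p : Int → Bool) :
    (PySem.List.pyRange ((xs.length : Int) - 1) (-1) (-1)).any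
      (fun i => p (PySem.List.pyGetD xs i 0)) = xs.any p := by
  rw [PySem.List.pyRange_neg_one_eq_reverse, List.any_reverse,
    show ((-1 : Int) + 1) = 0 by norm_num,
    show ((xs.length : Int) - 1 + 1) = (xs.length : Int) by ring,
    show (fun i => p (PySem.List.pyGetD xs i 0)) =
      (p ∘ fun i => PySem.List.pyGetD xs i 0) from rfl,
    ← List.any_map, PySem.List.map_pyGetD_pyRange_zero']

-- A returns true iff some bullet value occurs among the enemies
lemma shooting_enemies_eq_any (bs es : List Int) :
    shooting_enemies bs es = bs.any (fun x => es.any (fun y => x == y)) := by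
  unfold shooting_enemies
  rw [any_pyRange_rev bs (fun x =>
    (PySem.List.pyRange ((es.length : Int) - 1) (-1) (-1)).any
      (fun i => x == PySem.List.pyGetD es i 0))]
  congr 1; funext x
  exact any_pyRange_rev es (fun y => x == y)

-- the merge scan on two ≤-sorted lists decides exactly non-disjointness
lemma pvMerge_iff (xs ys : List Int) (hx : xs.Pairwise (· ≤ ·)) (hy : ys.Pairwise (· ≤ ·)) :
    pvMerge xs ys = true ↔ ∃ x ∈ xs, x ∈ ys := by
  induction xs, ys using pvMerge.induct with
  | case1 ys => simp [pvMerge]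
  | case2 a as => simp [pvMerge]
  | case3 a as b bs heq =>
    have hab : a = b := by simpa using heq
    simp [pvMerge, hab]
  | case4 a as b bs heq hlt ih =>
    have hyall := (List.pairwise_cons.mp hy).1
    have hx' := (List.pairwise_cons.mp hx).2
    have hne : a ≠ b := by simpa using heq
    rw [pvMerge, if_neg (by simpa using heq), if_pos hlt, ih hx' hy]
    constructor
    · rintro ⟨x, hxas, hxy⟩; exact ⟨x, List.mem_cons_of_mem _ hxas, hxy⟩
    · rintro ⟨x, hxs, hxy⟩
      rcases List.mem_cons.mp hxs with rfl | hxas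
      · exfalso
        rcases List.mem_cons.mp hxy with rfl | hxbs
        · exact hne rfl
        · have := hyall x hxbs; omega
      · exact ⟨x, hxas, hxy⟩
  | case5 a as b bs heq hnlt ih =>
    have hxall := (List.pairwise_cons.mp hx).1
    have hy' := (List.pairwise_cons.mp hy).2
    have hne : a ≠ b := by simpa using heq
    rw [pvMerge, if_neg (by simpa using heq), if_neg hnlt, ih hx hy']
    constructor
    · rintro ⟨x, hxs, hxy⟩; exact ⟨x, hxs, List.mem_cons_of_mem _ hxy⟩
    · rintro ⟨x, hxs, hxy⟩
      rcases List.mem_cons.mp hxy with rfl | hxbs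
      · exfalso
        rcases List.mem_cons.mp hxs with rfl | hxas
        · exact hne rfl
        · have := hxall x hxas; omega
      · exact ⟨x, hxs, hxbs⟩

-- sorted copies have the same members, so B decides non-disjointness of the originals
lemma alt_eq_any (bs es : List Int) :
    shooting_enemies_alt bs es = bs.any (fun x => es.any (fun y => x == y)) := by
  unfold shooting_enemies_alt
  have hbp : (PySem.List.sorted bs (fun x => x) false).Pairwise (· ≤ ·) :=
    PySem.List.sorted_pairwise bs (fun x => x)
  have hep : (PySem.List.sorted es (fun x => x) false).Pairwise (· ≤ ·) :=
    PySem.List.sorted_pairwise es (fun x => x)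
  have h := pvMerge_iff _ _ hbp hep
  have hrhs : (bs.any (fun x => es.any (fun y => x == y)) = true) ↔ ∃ x ∈ bs, x ∈ es := by
    simp [List.any_eq_true]
  cases hm : pvMerge (PySem.List.sorted bs (fun x => x) false)
      (PySem.List.sorted es (fun x => x) false) with
  | true =>
    have ⟨x, hx1, hx2⟩ := h.mp hm
    have : ∃ x ∈ bs, x ∈ es :=
      ⟨x, (PySem.List.mem_sorted _ _ _ _).mp hx1, (PySem.List.mem_sorted _ _ _ _).mp hx2⟩
    exact (hrhs.mpr this).symm
  | false =>
    by_contra hc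
    have : bs.any (fun x => es.any (fun y => x == y)) = true := by
      cases hb : bs.any (fun x => es.any (fun y => x == y)) <;> simp_all
    have ⟨x, hx1, hx2⟩ := hrhs.mp this
    have : pvMerge _ _ = true := h.mpr
      ⟨x, (PySem.List.mem_sorted _ _ _ _).mpr hx1, (PySem.List.mem_sorted _ _ _ _).mpr hx2⟩
    simp_all

-- ===== VERDICT (by name: the statement is the Claim_ definition above) =====
theorem shooting_enemies_spec : Claim_equal_shooting_enemies := by
  intro bs es _
  unfold Spec_shooting_enemies
  rw [shooting_enemies_eq_any, alt_eq_any]
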